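-- pv_equiv track=rewrite | github.com/CJ10110425/2023_NKNU_linebot | professor_DB.py | score_mechanism
-- ===== SOURCE A (Python) =====
-- def score_mechanism(user_id: str) -> dict[str: int]:
--
--     alpha_upper_score = 0
--     alpha_lower_score = 0
--     integer_score = 0
--
--     for alphabet in user_id:
--         if alphabet.isalpha():
--             if alphabet.isupper():
--                 alpha_upper_score += ord(alphabet)
--             else:
--                 alpha_lower_score += ord(alphabet)
--         else:
--             integer_score += ord(alphabet)
--
--     result = {"alpha_upper_score": alpha_upper_score, "alpha_lower_score": alpha_lower_score, "integer_score": integer_score}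
--
--     return result
-- ===== SOURCE B (Python) =====
-- def score_mechanism(user_id: str) -> dict:
--     # Build a character-frequency map once, then do one weighted pass
--     # over the distinct characters (ord * multiplicity per category).
--     freq = {}
--     for ch in user_id:
--         freq[ch] = freq.get(ch, 0) + 1
--     upper = lower = other = 0
--     for ch, n in freq.items():
--         if not ch.isalpha():
--             other += ord(ch) * n
--         elif ch.isupper():
--             upper += ord(ch) * n
--         else:
--             lower += ord(ch) * n
--     return {"alpha_upper_score": upper,
--             "alpha_lower_score": lower,
--             "integer_score": other}
-- ===== Notes on version B (the rewrite author's own statement) =====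
-- stated objective: alternative
-- what changed: Instead of classifying every character in a single accumulating scan, B first builds a character-frequency dictionary and then computes each category sum in one weighted pass over the distinct characters (ord(ch) * count).
import Mathlib
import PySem

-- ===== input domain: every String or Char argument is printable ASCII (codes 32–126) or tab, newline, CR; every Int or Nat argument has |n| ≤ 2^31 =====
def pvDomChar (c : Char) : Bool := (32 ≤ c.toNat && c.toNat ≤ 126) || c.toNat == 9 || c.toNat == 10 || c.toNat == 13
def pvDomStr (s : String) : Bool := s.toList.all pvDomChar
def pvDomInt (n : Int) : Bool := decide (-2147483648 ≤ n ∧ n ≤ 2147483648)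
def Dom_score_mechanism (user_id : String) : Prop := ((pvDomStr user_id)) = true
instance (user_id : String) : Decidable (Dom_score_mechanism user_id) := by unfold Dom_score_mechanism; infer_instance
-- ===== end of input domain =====

-- B replaces A's single classifying scan by a character-frequency dictionary built first,
-- then one weighted pass over the distinct characters (ord * multiplicity per category).


-- ===== PORT A =====
def score_mechanism (user_id : String) : List (String × Int) :=
  let st := user_id.toList.foldl (fun (s : Int × Int × Int) alphabet =>
    if PySem.Chars.isalpha alphabet then
      if PySem.Chars.isupper alphabet then (s.1 + alphabet.toNat, s.2.1, s.2.2)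
      else (s.1, s.2.1 + alphabet.toNat, s.2.2)
    else (s.1, s.2.1, s.2.2 + alphabet.toNat)) (0, 0, 0)
  [("alpha_upper_score", st.1), ("alpha_lower_score", st.2.1), ("integer_score", st.2.2)]

-- ===== PORT B =====
def score_mechanism_alt (user_id : String) : List (String × Int) :=
  let freq : PySem.Dict Char Int :=
    user_id.toList.foldl (fun d ch => d.insert ch (d.getD ch 0 + 1)) PySem.Dict.empty
  let st := freq.items.foldl (fun (s : Int × Int × Int) (p : Char × Int) =>
    if !PySem.Chars.isalpha p.1 then (s.1, s.2.1, s.2.2 + (p.1.toNat : Int) * p.2)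
    else if PySem.Chars.isupper p.1 then (s.1 + (p.1.toNat : Int) * p.2, s.2.1, s.2.2)
    else (s.1, s.2.1 + (p.1.toNat : Int) * p.2, s.2.2)) (0, 0, 0)
  [("alpha_upper_score", st.1), ("alpha_lower_score", st.2.1), ("integer_score", st.2.2)]

-- ===== PRECONDITION & SPEC =====
def Spec_score_mechanism (user_id : String) (out : List (String × Int)) : Prop := out = score_mechanism_alt user_id
instance (user_id : String) (out : List (String × Int)) : Decidable (Spec_score_mechanism user_id out) := by unfold Spec_score_mechanism; infer_instance

-- ===== CLAIM (what is proved, stated in full; the proofs are below) =====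
def Claim_equal_score_mechanism : Prop := ∀ (user_id : String), Dom_score_mechanism user_id → Spec_score_mechanism user_id (score_mechanism user_id)

-- ===== LEMMAS AND PROOFS =====

-- A's fold, characterised componentwise by three filtered sums.
lemma foldA_eq (cs : List Char) (a b c : Int) :
    cs.foldl (fun (s : Int × Int × Int) alphabet =>
      if PySem.Chars.isalpha alphabet then
        if PySem.Chars.isupper alphabet then (s.1 + alphabet.toNat, s.2.1, s.2.2)
        else (s.1, s.2.1 + alphabet.toNat, s.2.2)
      else (s.1, s.2.1, s.2.2 + alphabet.toNat)) (a, b, c)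
    = (a + (cs.map (fun x => if PySem.Chars.isalpha x && PySem.Chars.isupper x then (x.toNat : Int) else 0)).sum,
       b + (cs.map (fun x => if PySem.Chars.isalpha x && !PySem.Chars.isupper x then (x.toNat : Int) else 0)).sum,
       c + (cs.map (fun x => if !PySem.Chars.isalpha x then (x.toNat : Int) else 0)).sum) := by
  induction cs generalizing a b c with
  | nil => simp
  | cons h t ih =>
    by_cases h1 : PySem.Chars.isalpha h <;> by_cases h2 : PySem.Chars.isupper h <;>
      simp [List.foldl, h1, h2, ih] <;> ring

-- B's fold over the (char, count) items, characterised by count-weighted sums.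
lemma foldB_eq (ps : List (Char × Int)) (a b c : Int) :
    ps.foldl (fun (s : Int × Int × Int) (p : Char × Int) =>
      if !PySem.Chars.isalpha p.1 then (s.1, s.2.1, s.2.2 + (p.1.toNat : Int) * p.2)
      else if PySem.Chars.isupper p.1 then (s.1 + (p.1.toNat : Int) * p.2, s.2.1, s.2.2)
      else (s.1, s.2.1 + (p.1.toNat : Int) * p.2, s.2.2)) (a, b, c)
    = (a + (ps.map (fun p => p.2 * (if PySem.Chars.isalpha p.1 && PySem.Chars.isupper p.1 then (p.1.toNat : Int) else 0))).sum,
       b + (ps.map (fun p => p.2 * (if PySem.Chars.isalpha p.1 && !PySem.Chars.isupper p.1 then (p.1.toNat : Int) else 0))).sum,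
       c + (ps.map (fun p => p.2 * (if !PySem.Chars.isalpha p.1 then (p.1.toNat : Int) else 0))).sum) := by
  induction ps generalizing a b c with
  | nil => simp
  | cons h t ih =>
    by_cases h1 : PySem.Chars.isalpha h.1 <;> by_cases h2 : PySem.Chars.isupper h.1 <;>
      simp only [List.foldl_cons, h1, h2, Bool.not_true, Bool.not_false, if_true, if_false,
        Bool.false_eq_true] <;>
      rw [ih] <;> simp [h1, h2] <;> ring_nf

-- Summing 'if k = c then f k else 0' over a Nodup list containing c gives f c.
lemma sum_single (S : List Char) (f : Char → Int) (c : Char) (hnd : S.Nodup) (hc : c ∈ S) :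
    (S.map (fun k => if k = c then f k else 0)).sum = f c := by
  induction S with
  | nil => cases hc
  | cons x t ih =>
    rcases List.mem_cons.mp hc with h | h
    · have hx : x ∉ t := (List.nodup_cons.mp hnd).1
      have hz : (t.map (fun k => if k = c then f k else 0)).sum = 0 := by
        apply List.sum_eq_zero
        intro y hy
        rcases List.mem_map.mp hy with ⟨k, hk, rfl⟩
        have hne : k ≠ c := fun he => hx ((h.symm.trans he.symm).symm ▸ hk)
        simp [hne]
      have hxc : x = c := h.symm
      simp [hxc, hz]
    · have hx : x ≠ c := by
        rintro rfl; exact (List.nodup_cons.mp hnd).1 h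
      simp [hx, ih (List.nodup_cons.mp hnd).2 h]

-- Core: weighted sum over any Nodup superset of the distinct chars = plain sum over the string.
lemma weighted_sum (cs S : List Char) (f : Char → Int)
    (hnd : S.Nodup) (hsub : ∀ c ∈ cs, c ∈ S) :
    (S.map (fun k => (cs.count k : Int) * f k)).sum = (cs.map f).sum := by
  induction cs with
  | nil => simp
  | cons c t ih =>
    have hsub' : ∀ x ∈ t, x ∈ S := fun x hx => hsub x (List.mem_cons_of_mem _ hx)
    have hsplit : ∀ k, ((c :: t).count k : Int) * f k
        = (t.count k : Int) * f k + (if k = c then f k else 0) := by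
      intro k
      by_cases hk : k = c
      · subst hk; simp; ring
      · have hk' : ¬c = k := fun he => hk he.symm
        simp [hk, hk']
    calc (S.map (fun k => ((c :: t).count k : Int) * f k)).sum
        = (S.map (fun k => (t.count k : Int) * f k + (if k = c then f k else 0))).sum := by
          simp only [hsplit]
      _ = (S.map (fun k => (t.count k : Int) * f k)).sum
            + (S.map (fun k => if k = c then f k else 0)).sum := by
          rw [← List.sum_map_add]
      _ = (t.map f).sum + f c := by
          rw [ih hsub', sum_single S f c hnd (hsub c (List.mem_cons_self))]
      _ = ((c :: t).map f).sum := by simp [List.map_cons]; ring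

-- One component of B's sum over the counter's items equals A's plain sum.
lemma items_weighted (cs : List Char) (f : Char → Int) :
    (((PySem.Dict.counter cs).items).map (fun p => p.2 * f p.1)).sum = (cs.map f).sum := by
  rw [PySem.Dict.items_counter]
  rw [List.map_map]
  have : ((fun p : Char × Int => p.2 * f p.1) ∘ fun k => (k, (cs.count k : Int)))
      = fun k => (cs.count k : Int) * f k := rfl
  rw [this]
  exact weighted_sum cs (PySem.Set.ofList cs) f (PySem.Set.nodup_ofList cs)
    (fun c hc => (PySem.Set.mem_ofList cs c).mpr hc)

-- ===== VERDICT (by name: the statement is the Claim_ definition above) =====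
theorem score_mechanism_spec : Claim_equal_score_mechanism := by
  intro user_id _
  unfold Spec_score_mechanism score_mechanism score_mechanism_alt
  simp only [PySem.Dict.foldl_insert_getD_add_one_eq_counter, foldA_eq, foldB_eq]
  rw [items_weighted user_id.toList
        (fun x => if PySem.Chars.isalpha x && PySem.Chars.isupper x then (x.toNat : Int) else 0),
      items_weighted user_id.toList
        (fun x => if PySem.Chars.isalpha x && !PySem.Chars.isupper x then (x.toNat : Int) else 0),
      items_weighted user_id.toList
        (fun x => if !PySem.Chars.isalpha x then (x.toNat : Int) else 0)]
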